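/- GENERATED by farm/mkstatement.py from design/units.tsv (unit `DGifDecreaseImageCounter.2`) and the assertions of Gif/Spec/Seg_DGifDecreaseImageCounter.lean — do not edit.
   THE STATEMENT of the proof unit `DGifDecreaseImageCounter.2`: segment 2 of `DGifDecreaseImageCounter` (15 instructions; entries 0x10a4b1;
   exits 0x10a4f2; ranges 0x10a4b1-0x10a4f2)
   takes each of its entry assertions to one of its exit assertions (`Gif.Spec.DGifDecreaseImageCounter.Seg2`), given the contracts of its callees.
   What the names mean: ProgX/Base/Spec/Basic.lean (the shared hypotheses), Gif/Spec/Seg_DGifDecreaseImageCounter.lean (the assertions). The theorem to prove: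
   `theorem DGifDecreaseImageCounter_2_ok : Gif.Spec.DGifDecreaseImageCounter_2.Statement`. -/
import Gif.Code
import Gif.Dec.All
import Gif.Labels
import Gif.Spec.Alloc
import Gif.Spec.Seg_DGifDecreaseImageCounter
namespace Gif.Spec.DGifDecreaseImageCounter_2
open X86 X86.User Asan

/-- The statement of unit `DGifDecreaseImageCounter.2`. -/
def Statement : Prop :=
  ∀ (Lay : Layout) (_hLay : Lay.hi = 0x1000000) (μ : Microarch) (_hμ : UserX.MicroOK μ) (u₀ : State)
    (_hcode : HasCodeNat Lay u₀ Gif.L.DGifDecreaseImageCounter.entry Gif.Code.code_DGifDecreaseImageCounter.nat Gif.L.DGifDecreaseImageCounter.size)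
    (_h_GifFreeMapObject : ∀ (H : Heap) (rest : List Obj) (frames : List (Nat × FrameLayout)) (colors n : Nat), Calls Lay μ ProgX.Base.WayInv (ProgX.Base.conv u₀) Gif.L.GifFreeMapObject.entry (Gif.Spec.GifFreeMapObject.spec H rest frames colors n))
    (_h_asan_load8_noabort : Asan.SmallCheck Lay μ ProgX.Base.WayInv (ProgX.Base.CodeOK u₀) [.rax, .rcx, .rdx] 8 ProgX.Base.L.__asan_load8_noabort.entry)
    (_h_asan_load4_noabort : Asan.SmallCheck Lay μ ProgX.Base.WayInv (ProgX.Base.CodeOK u₀) [.rax, .rcx, .rdx] 4 ProgX.Base.L.__asan_load4_noabort.entry),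
    Gif.Spec.DGifDecreaseImageCounter.Seg2 Lay μ u₀

end Gif.Spec.DGifDecreaseImageCounter_2
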